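-- pv_equiv track=rewrite | github.com/kav-institute/ddmdn | framework/datasets/common/utils.py | check_timestamps
-- ===== SOURCE A (Python) =====
-- def check_timestamps(timestamps, frame_step=1):
--
--     sublists = []
--     current_sublist = [timestamps[0]]
--
--     for i in range(1, len(timestamps)):
--
--         if timestamps[i] - timestamps[i-1] == frame_step:
--
--             current_sublist.append(timestamps[i])
--
--         else:
--
--             sublists.append(current_sublist)
--             current_sublist = [timestamps[i]]
--
--     sublists.append(current_sublist)
--
--     return sublists
-- ===== SOURCE B (Python) =====
-- def check_timestamps(timestamps, frame_step=1):
--     n = len(timestamps)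
--     breaks = [i for i in range(1, n)
--               if timestamps[i] - timestamps[i - 1] != frame_step]
--     bounds = [0] + breaks + [n]
--     return [timestamps[bounds[j]:bounds[j + 1]] for j in range(len(bounds) - 1)]
-- ===== Notes on version B (the rewrite author's own statement) =====
-- stated objective: alternative
-- what changed: Replaces the single stateful loop that grows a current sublist with a two-pass scheme: first collect the break indices, then cut the input into slices between consecutive boundary markers.
-- outside the precondition, e.g. on check_timestamps([], 1): A raises IndexError, B returns [[]]
import Mathlib
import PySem

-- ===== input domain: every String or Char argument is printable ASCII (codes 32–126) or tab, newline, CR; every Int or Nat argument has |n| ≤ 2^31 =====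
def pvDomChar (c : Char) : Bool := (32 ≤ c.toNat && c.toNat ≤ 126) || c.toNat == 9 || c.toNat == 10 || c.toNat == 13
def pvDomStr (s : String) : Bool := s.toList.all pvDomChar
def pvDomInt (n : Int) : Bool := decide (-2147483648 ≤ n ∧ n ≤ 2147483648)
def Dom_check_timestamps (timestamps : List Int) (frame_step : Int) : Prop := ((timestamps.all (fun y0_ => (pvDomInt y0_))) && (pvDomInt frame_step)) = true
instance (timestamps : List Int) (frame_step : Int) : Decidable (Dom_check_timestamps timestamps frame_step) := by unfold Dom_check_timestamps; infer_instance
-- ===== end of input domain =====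

-- B replaces A's stateful run-accumulation loop by a two-pass break-index + slicing scheme (alternative decomposition, same cost); equivalence is about the return value (A mutates nothing).

-- ===== PORT A =====
def check_timestamps (timestamps : List Int) (frame_step : Int) : List (List Int) :=
  let current_sublist : List Int := [PySem.List.pyGetD timestamps 0 0]
  let st := (PySem.List.pyRange 1 (timestamps.length : Int) 1).foldl
    (fun (s : List (List Int) × List Int) (i : Int) =>
      if PySem.List.pyGetD timestamps i 0 - PySem.List.pyGetD timestamps (i-1) 0 = frame_step
      then (s.1, s.2 ++ [PySem.List.pyGetD timestamps i 0])
      else (s.1 ++ [s.2], [PySem.List.pyGetD timestamps i 0]))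
    (([] : List (List Int)), current_sublist)
  st.1 ++ [st.2]

-- ===== PORT B =====
def check_timestamps_alt (timestamps : List Int) (frame_step : Int) : List (List Int) :=
  let n : Int := timestamps.length
  let breaks : List Int := (PySem.List.pyRange 1 n 1).filter
    (fun i => !(PySem.List.pyGetD timestamps i 0 - PySem.List.pyGetD timestamps (i-1) 0 == frame_step))
  let bounds : List Int := 0 :: (breaks ++ [n])
  (PySem.List.pyRange 0 ((bounds.length : Int) - 1) 1).map
    (fun j => PySem.List.slice timestamps (some (PySem.List.pyGetD bounds j 0)) (some (PySem.List.pyGetD bounds (j+1) 0)))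

-- ===== PRECONDITION & SPEC =====
-- Pre_ excludes only the empty list, on which A raises IndexError (timestamps[0]).
def Pre_check_timestamps (timestamps : List Int) (frame_step : Int) : Prop := timestamps ≠ []
instance (timestamps : List Int) (frame_step : Int) : Decidable (Pre_check_timestamps timestamps frame_step) := by unfold Pre_check_timestamps; infer_instance
def pvWitness_check_timestamps : List Int × Int := ([1, 2, 5, 6, 7], 1)

def Spec_check_timestamps (timestamps : List Int) (frame_step : Int) (out : List (List Int)) : Prop := out = check_timestamps_alt timestamps frame_step
instance (timestamps : List Int) (frame_step : Int) (out : List (List Int)) : Decidable (Spec_check_timestamps timestamps frame_step out) := by unfold Spec_check_timestamps; infer_instance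

-- ===== CLAIM (what is proved, stated in full; the proofs are below) =====
def Claim_equal_check_timestamps : Prop := ∀ (timestamps : List Int) (frame_step : Int), Dom_check_timestamps timestamps frame_step → Pre_check_timestamps timestamps frame_step → Spec_check_timestamps timestamps frame_step (check_timestamps timestamps frame_step)

-- ===== LEMMAS AND PROOFS =====

/-- Reference recursion: split `x :: xs` into maximal runs of consecutive `step` gaps. -/
def consHead (x : Int) : List (List Int) → List (List Int)
  | [] => [[x]]
  | h :: t => (x :: h) :: t

def clusters (step x : Int) : List Int → List (List Int)
  | [] => [[x]]
  | y :: ys => if y - x = step then consHead x (clusters step y ys) else [x] :: clusters step y ys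

/-- B's break predicate (the filter lambda of the B port). -/
def pb (ts : List Int) (step : Int) : Int → Bool :=
  fun i => !(PySem.List.pyGetD ts i 0 - PySem.List.pyGetD ts (i-1) 0 == step)

lemma clusters_shape (step x : Int) (xs : List Int) :
    ∃ h t, clusters step x xs = (x :: h) :: t := by
  induction xs generalizing x with
  | nil => exact ⟨[], [], rfl⟩
  | cons y ys ih =>
    obtain ⟨h, t, hyt⟩ := ih y
    by_cases hc : y - x = step
    · refine ⟨y :: h, t, ?_⟩
      simp only [clusters]
      rw [if_pos hc, hyt]
      rfl
    · refine ⟨[], clusters step y ys, ?_⟩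
      simp only [clusters]
      rw [if_neg hc]

/-- Adjacent-pair view of an index range. -/
lemma range_pairs (l : List Int) (d : Int) :
    (List.range (l.length - 1)).map (fun k => (l.getD k d, l.getD (k+1) d)) = l.zip l.tail := by
  induction l with
  | nil => simp
  | cons a t ih =>
    cases t with
    | nil => simp
    | cons b t2 =>
      have h1 : (a :: b :: t2).length - 1 = t2.length + 1 := by simp
      rw [h1, List.range_succ_eq_map, List.map_cons, List.map_map]
      simp only [List.tail_cons, List.zip_cons_cons]
      refine List.cons_eq_cons.mpr ⟨by rfl, ?_⟩
      have ih' := ih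
      simp only [List.length_cons, Nat.add_sub_cancel, List.tail_cons] at ih'
      rw [← ih']
      apply List.map_congr_left
      intro k _
      simp [Function.comp, Nat.succ_eq_add_one]

lemma slice_single (ts : List Int) (s : Nat) (hs : s < ts.length) :
    PySem.List.slice ts (some ((s : Nat) : Int)) (some ((s : Int) + 1)) = [ts.getD s 0] := by
  rw [PySem.List.slice_of_nonneg ts (by omega) (by omega) (by omega) (by omega)]
  rw [show ((s : Int) + 1).toNat = ((s : Int)).toNat + 1 from by omega,
      show ((s : Int)).toNat = s from by omega]
  rw [List.drop_eq_getElem_cons hs]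
  rw [show s + 1 - s = 0 + 1 from by omega, List.take_succ_cons, List.take_zero,
      List.getD_eq_getElem _ _ hs]

lemma slice_cons (ts : List Int) (s : Nat) (b : Int) (hs : s < ts.length)
    (hsb : (s : Int) < b) (hble : b ≤ (ts.length : Int)) :
    PySem.List.slice ts (some ((s : Nat) : Int)) (some b)
      = ts.getD s 0 :: PySem.List.slice ts (some ((s : Int) + 1)) (some b) := by
  rw [PySem.List.slice_of_nonneg ts (by omega) (by omega) (by omega) hble]
  rw [PySem.List.slice_of_nonneg ts (by omega) (by omega) (by omega) hble]
  rw [show ((s : Int) + 1).toNat = s + 1 from by omega, show ((s : Int)).toNat = s from by omega]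
  rw [List.drop_eq_getElem_cons hs]
  rw [show b.toNat - s = (b.toNat - (s + 1)) + 1 from by omega]
  rw [List.take_succ_cons, List.getD_eq_getElem _ _ hs]

lemma foldA (step : Int) (rest : List Int) : ∀ (prev : Int) (subs : List (List Int)) (cur : List Int),
    (((prev :: rest).zip rest).foldl
        (fun (x : List (List Int) × List Int) (p : Int × Int) =>
          if p.2 - p.1 = step then (x.1, x.2 ++ [p.2]) else (x.1 ++ [x.2], [p.2]))
        (subs, cur)).1 ++
    [(((prev :: rest).zip rest).foldl
        (fun (x : List (List Int) × List Int) (p : Int × Int) =>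
          if p.2 - p.1 = step then (x.1, x.2 ++ [p.2]) else (x.1 ++ [x.2], [p.2]))
        (subs, cur)).2]
    = subs ++ (match clusters step prev rest with
               | [] => [cur]
               | h :: t => (cur ++ h.tail) :: t) := by
  induction rest with
  | nil => intro prev subs cur; simp [clusters]
  | cons y ys ih =>
    intro prev subs cur
    obtain ⟨h, t, hyt⟩ := clusters_shape step y ys
    simp only [List.zip_cons_cons, List.foldl_cons]
    by_cases hc : y - prev = step
    · rw [if_pos hc, ih y subs (cur ++ [y]), hyt,
          show clusters step prev (y :: ys) = (prev :: y :: h) :: t from by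
            simp only [clusters]; rw [if_pos hc, hyt]; rfl]
      simp [List.append_assoc]
    · rw [if_neg hc, ih y (subs ++ [cur]) [y], hyt,
          show clusters step prev (y :: ys) = [prev] :: ((y :: h) :: t) from by
            simp only [clusters]; rw [if_neg hc, hyt]]
      simp

lemma sliceB (ts : List Int) (step : Int) :
    ∀ (k s : Nat), s < ts.length → ts.length - (s + 1) = k →
    ((((s : Int) :: ((PySem.List.pyRange ((s : Int) + 1) (ts.length : Int) 1).filter (pb ts step) ++ [(ts.length : Int)])).zip
      ((PySem.List.pyRange ((s : Int) + 1) (ts.length : Int) 1).filter (pb ts step) ++ [(ts.length : Int)])).map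
      (fun q => PySem.List.slice ts (some q.1) (some q.2)))
    = clusters step (ts.getD s 0) (ts.drop (s + 1)) := by
  intro k
  induction k with
  | zero =>
    intro s hs hk
    have hse : ts.length = s + 1 := by omega
    rw [PySem.List.pyRange_one_eq_nil (show (ts.length : Int) ≤ (s : Int) + 1 from by omega)]
    simp only [List.filter_nil, List.nil_append, List.zip_cons_cons, List.zip_nil_right,
      List.map_cons, List.map_nil]
    rw [show ((ts.length : Int)) = (s : Int) + 1 from by omega]
    rw [slice_single ts s hs]
    rw [show s + 1 = ts.length from hse.symm, List.drop_length]
    rfl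
  | succ k ih =>
    intro s hs hk
    have hs1 : s + 1 < ts.length := by omega
    have e1 : PySem.List.pyGetD ts ((s : Int) + 1) 0 = ts.getD (s + 1) 0 := by
      rw [show ((s : Int) + 1) = (((s + 1) : Nat) : Int) from by push_cast; ring,
          PySem.List.pyGetD_natCast]
    have e2 : PySem.List.pyGetD ts ((s : Int) + 1 - 1) 0 = ts.getD s 0 := by
      rw [show ((s : Int) + 1 - 1) = ((s : Nat) : Int) from by ring,
          PySem.List.pyGetD_natCast]
    have hdrop : ts.drop (s + 1) = ts.getD (s + 1) 0 :: ts.drop (s + 2) := by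
      rw [List.drop_eq_getElem_cons hs1, List.getD_eq_getElem _ _ hs1]
    rw [PySem.List.pyRange_one_cons (show ((s : Int) + 1) < ((ts.length : Int)) from by omega)]
    rw [List.filter_cons]
    have hpbv : pb ts step ((s : Int) + 1) = !(ts.getD (s + 1) 0 - ts.getD s 0 == step) := by
      unfold pb; rw [e1, e2]
    rw [show (s : Int) + 1 + 1 = (((s + 1) : Nat) : Int) + 1 from by push_cast; ring]
    have IH := ih (s + 1) hs1 (by omega)
    obtain ⟨h, t, hyt⟩ := clusters_shape step (ts.getD (s + 1) 0) (ts.drop (s + 2))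
    by_cases hb : ts.getD (s + 1) 0 - ts.getD s 0 = step
    · -- gap continues the run: the filter drops index s+1
      rw [hpbv, if_neg (by rw [hb]; simp)]
      set F := (PySem.List.pyRange ((((s + 1) : Nat) : Int) + 1) ((ts.length : Int)) 1).filter (pb ts step) with hFdef
      obtain ⟨b, L', hL, hbgt, hble⟩ :
          ∃ b L', F ++ [((ts.length : Int))] = b :: L' ∧ (s : Int) + 1 < b ∧ b ≤ (ts.length : Int) := by
        rcases hF : F with _ | ⟨b0, F'⟩
        · exact ⟨(ts.length : Int), [], by simp, by omega, le_refl _⟩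
        · have hmem : b0 ∈ F := by rw [hF]; exact List.mem_cons_self
          have hmem2 := (List.mem_filter.mp hmem).1
          rw [PySem.List.mem_pyRange_one] at hmem2
          exact ⟨b0, F' ++ [((ts.length : Int))], by simp, by push_cast at hmem2 ⊢; omega,
                 by push_cast at hmem2 ⊢; omega⟩
      rw [hL] at IH ⊢
      simp only [List.zip_cons_cons, List.map_cons] at IH ⊢
      rw [hyt] at IH
      injection IH with IH1 IH2
      rw [hdrop]
      rw [show clusters step (ts.getD s 0) (ts.getD (s + 1) 0 :: ts.drop (s + 2))
            = (ts.getD s 0 :: ts.getD (s + 1) 0 :: h) :: t from by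
          simp only [clusters]; rw [if_pos hb, hyt]; rfl]
      rw [IH2]
      rw [slice_cons ts s b hs (by omega) hble]
      rw [show ((s : Int) + 1) = (((s + 1) : Nat) : Int) from by push_cast; ring, IH1]
    · -- gap breaks the run: the filter keeps index s+1
      rw [hpbv, if_pos (by rw [beq_eq_false_iff_ne.mpr hb]; rfl)]
      rw [List.cons_append]
      simp only [List.zip_cons_cons, List.map_cons]
      rw [slice_single ts s hs]
      rw [show ((s : Int) + 1) = (((s + 1) : Nat) : Int) from by push_cast; ring]
      rw [IH, hdrop]
      rw [show clusters step (ts.getD s 0) (ts.getD (s + 1) 0 :: ts.drop (s + 2))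
            = [ts.getD s 0] :: clusters step (ts.getD (s + 1) 0) (ts.drop (s + 2)) from by
          simp only [clusters]; rw [if_neg hb]]

-- ===== VERDICT (by name: the statement is the Claim_ definition above) =====
theorem check_timestamps_spec : Claim_equal_check_timestamps := by
  intro ts fs _hdom hpre
  unfold Spec_check_timestamps
  obtain ⟨prev, rest, rfl⟩ := List.exists_cons_of_ne_nil hpre
  have hA : check_timestamps (prev :: rest) fs = clusters fs prev rest := by
    unfold check_timestamps
    rw [PySem.List.pyRange_one]
    rw [show ((((prev :: rest).length : Int)) - 1).toNat = (prev :: rest).length - 1 from by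
      omega]
    simp only [List.foldl_map]
    have hfun : (fun (x : List (List Int) × List Int) (y : Nat) =>
        if PySem.List.pyGetD (prev :: rest) (1 + (y : Int)) 0
             - PySem.List.pyGetD (prev :: rest) (1 + (y : Int) - 1) 0 = fs
        then (x.1, x.2 ++ [PySem.List.pyGetD (prev :: rest) (1 + (y : Int)) 0])
        else (x.1 ++ [x.2], [PySem.List.pyGetD (prev :: rest) (1 + (y : Int)) 0]))
      = (fun (x : List (List Int) × List Int) (y : Nat) =>
          if ((prev :: rest).getD (y + 1) 0 - (prev :: rest).getD y 0 = fs)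
          then (x.1, x.2 ++ [(prev :: rest).getD (y + 1) 0])
          else (x.1 ++ [x.2], [(prev :: rest).getD (y + 1) 0])) := by
      funext x y
      rw [show (1 : Int) + (y : Int) - 1 = ((y : Nat) : Int) from by ring,
          show (1 : Int) + (y : Int) = (((y + 1) : Nat) : Int) from by push_cast; ring,
          PySem.List.pyGetD_natCast, PySem.List.pyGetD_natCast]
    rw [hfun]
    have hpairs : (List.foldl (fun (x : List (List Int) × List Int) (y : Nat) =>
          if ((prev :: rest).getD (y + 1) 0 - (prev :: rest).getD y 0 = fs)
          then (x.1, x.2 ++ [(prev :: rest).getD (y + 1) 0])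
          else (x.1 ++ [x.2], [(prev :: rest).getD (y + 1) 0]))
        (([] : List (List Int)), [PySem.List.pyGetD (prev :: rest) 0 0])
        (List.range ((prev :: rest).length - 1)))
      = (List.foldl (fun (x : List (List Int) × List Int) (p : Int × Int) =>
          if p.2 - p.1 = fs then (x.1, x.2 ++ [p.2]) else (x.1 ++ [x.2], [p.2]))
        (([] : List (List Int)), [PySem.List.pyGetD (prev :: rest) 0 0])
        (((prev :: rest)).zip rest)) := by
      rw [show ((prev :: rest)).zip rest = ((prev :: rest)).zip ((prev :: rest).tail) from rfl]
      rw [← range_pairs (prev :: rest) 0]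
      rw [List.foldl_map]
    rw [hpairs, PySem.List.pyGetD_zero_cons]
    rw [foldA fs rest prev [] [prev]]
    obtain ⟨h, t, hyt⟩ := clusters_shape fs prev rest
    rw [hyt]
    simp
  have hB : check_timestamps_alt (prev :: rest) fs = clusters fs prev rest := by
    unfold check_timestamps_alt
    dsimp only
    rw [show (fun i => !(PySem.List.pyGetD (prev :: rest) i 0
          - PySem.List.pyGetD (prev :: rest) (i - 1) 0 == fs)) = pb (prev :: rest) fs from rfl]
    set bounds : List Int := 0 :: ((PySem.List.pyRange 1 ((prev :: rest).length : Int) 1).filter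
      (pb (prev :: rest) fs) ++ [((prev :: rest).length : Int)]) with hbdef
    rw [PySem.List.pyRange_one]
    rw [show (((bounds.length : Int)) - 1 - 0).toNat = bounds.length - 1 from by omega]
    rw [List.map_map]
    have hfunB : ((fun j => PySem.List.slice (prev :: rest)
          (some (PySem.List.pyGetD bounds j 0)) (some (PySem.List.pyGetD bounds (j + 1) 0)))
        ∘ (fun k : Nat => (0 : Int) + (k : Int)))
      = (fun k : Nat => PySem.List.slice (prev :: rest)
          (some (bounds.getD k 0)) (some (bounds.getD (k + 1) 0))) := by
      funext k
      simp only [Function.comp]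
      rw [show (0 : Int) + (k : Int) + 1 = (((k + 1) : Nat) : Int) from by push_cast; ring,
          show (0 : Int) + (k : Int) = ((k : Nat) : Int) from by ring,
          PySem.List.pyGetD_natCast, PySem.List.pyGetD_natCast]
    rw [hfunB]
    have hmm : (List.range (bounds.length - 1)).map (fun k : Nat => PySem.List.slice (prev :: rest)
          (some (bounds.getD k 0)) (some (bounds.getD (k + 1) 0)))
        = ((List.range (bounds.length - 1)).map
            (fun k => (bounds.getD k 0, bounds.getD (k + 1) 0))).map
          (fun q : Int × Int => PySem.List.slice (prev :: rest) (some q.1) (some q.2)) := by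
      rw [List.map_map]
      exact List.map_congr_left fun k _ => rfl
    rw [hmm, range_pairs bounds 0]
    have SB := sliceB (prev :: rest) fs rest.length 0 (by simp) (by simp)
    simp only [Nat.cast_zero, zero_add, List.getD_cons_zero, List.drop_succ_cons,
      List.drop_zero] at SB
    rw [hbdef]
    simp only [List.tail_cons]
    exact SB
  rw [hA, hB]
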